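-- pv_equiv track=rewrite | github.com/sitongan/vSearch | vSearchStrategy.py | genvlist_itrRm
-- ===== SOURCE A (Python) =====
-- def genvlist_itrRm(vlist_lines, checkedvlist, vlist_all):
-- 	curr_strategy="Iterative Removal"
-- 	#define stratgy to generate next-gen vlists from a single parent vlist vlist_lines
-- 	#vlist_lines will contain only lines describing vars, excluding header and ampersand line
-- 	#return a tuple (list of varlists, string describing current strategy name)
-- 	out=[]
-- 	for i in range(0,len(vlist_lines)):
-- 		thisfile = []
-- 		for line in range(0,len(vlist_lines)):
-- 			if line != i:
-- 				thisfile.append(vlist_lines[line])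
-- 		out.append(thisfile)
-- 	return (out, curr_strategy)
-- ===== SOURCE B (Python) =====
-- def genvlist_itrRm(vlist_lines, checkedvlist, vlist_all):
-- 	curr_strategy="Iterative Removal"
-- 	out=[vlist_lines[:i] + vlist_lines[i+1:] for i in range(len(vlist_lines))]
-- 	return (out, curr_strategy)
-- ===== Notes on version B (the rewrite author's own statement) =====
-- stated objective: simpler
-- what changed: Replaced the inner per-element filter loop (testing line != i for every index) with a single slice concatenation vlist_lines[:i] + vlist_lines[i+1:] inside one comprehension, eliminating the element-wise traversal and index test.
import Mathlib
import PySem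

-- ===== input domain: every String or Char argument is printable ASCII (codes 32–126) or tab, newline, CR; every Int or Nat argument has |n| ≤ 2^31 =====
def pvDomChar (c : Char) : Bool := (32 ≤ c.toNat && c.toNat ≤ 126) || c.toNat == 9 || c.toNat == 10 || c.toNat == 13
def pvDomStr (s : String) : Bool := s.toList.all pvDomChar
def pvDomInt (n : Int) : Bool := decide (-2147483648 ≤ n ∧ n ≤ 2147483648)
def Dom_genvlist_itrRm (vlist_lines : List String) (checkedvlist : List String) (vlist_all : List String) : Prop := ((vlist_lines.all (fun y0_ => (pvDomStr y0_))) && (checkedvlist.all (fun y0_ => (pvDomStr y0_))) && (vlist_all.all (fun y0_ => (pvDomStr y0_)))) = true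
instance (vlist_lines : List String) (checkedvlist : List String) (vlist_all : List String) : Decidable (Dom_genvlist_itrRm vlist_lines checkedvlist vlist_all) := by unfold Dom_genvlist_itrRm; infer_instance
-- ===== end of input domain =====

-- B replaces A's inner per-element filter loop with one slice concatenation per index (simpler).

-- ===== PORT A =====
def genvlist_itrRm (vlist_lines : List String) (checkedvlist : List String) (vlist_all : List String) : List (List String) × String :=
  let curr_strategy := "Iterative Removal"
  let out : List (List String) :=
    (PySem.List.pyRange 0 (vlist_lines.length : Int) 1).foldl (fun out i =>
      let thisfile : List String :=
        (PySem.List.pyRange 0 (vlist_lines.length : Int) 1).foldl (fun thisfile line =>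
          if line ≠ i then thisfile ++ [PySem.List.pyGetD vlist_lines line ""] else thisfile) []
      out ++ [thisfile]) []
  (out, curr_strategy)

-- ===== PORT B =====
-- vlist_lines[:i] = take i, vlist_lines[i+1:] = drop (i+1)  (exact: 0 ≤ i < len)
def genvlist_itrRm_alt (vlist_lines : List String) (checkedvlist : List String) (vlist_all : List String) : List (List String) × String :=
  let curr_strategy := "Iterative Removal"
  let out : List (List String) :=
    (List.range vlist_lines.length).map (fun i => vlist_lines.take i ++ vlist_lines.drop (i+1))
  (out, curr_strategy)

-- ===== PRECONDITION & SPEC =====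
def Spec_genvlist_itrRm (vlist_lines : List String) (checkedvlist : List String) (vlist_all : List String) (out : List (List String) × String) : Prop := out = genvlist_itrRm_alt vlist_lines checkedvlist vlist_all
instance (vlist_lines : List String) (checkedvlist : List String) (vlist_all : List String) (out : List (List String) × String) : Decidable (Spec_genvlist_itrRm vlist_lines checkedvlist vlist_all out) := by unfold Spec_genvlist_itrRm; infer_instance

-- ===== CLAIM (what is proved, stated in full; the proofs are below) =====
def Claim_equal_genvlist_itrRm : Prop := ∀ (vlist_lines : List String) (checkedvlist : List String) (vlist_all : List String), Dom_genvlist_itrRm vlist_lines checkedvlist vlist_all → Spec_genvlist_itrRm vlist_lines checkedvlist vlist_all (genvlist_itrRm vlist_lines checkedvlist vlist_all)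

-- ===== LEMMAS AND PROOFS =====

-- the first k indices read back the prefix
theorem pv_map_take (vl : List String) (k : Nat) (hk : k ≤ vl.length) :
    (PySem.List.pyRange 0 (k : Int) 1).map (fun j => PySem.List.pyGetD vl j "") = vl.take k := by
  induction k with
  | zero => simp [PySem.List.pyRange_one_eq_nil]
  | succ k ih =>
    have h0 : (0 : Int) ≤ (k : Int) := Int.natCast_nonneg k
    have hcast : (((k+1 : Nat)) : Int) = ((k : Int) + 1) := by push_cast; ring
    rw [hcast, PySem.List.pyRange_one_succ_right h0, List.map_append, ih (by omega)]
    have hk' : k < vl.length := by omega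
    have hg : PySem.List.pyGetD vl (k : Int) "" = vl[k] := by
      rw [PySem.List.pyGetD_eq_getElem vl "" h0 (by exact_mod_cast hk')]
      simp
    rw [List.map_singleton, hg, List.take_add_one, List.getElem?_eq_getElem hk']
    simp

-- A's inner filter loop equals prefix ++ suffix around k
theorem pv_inner (vl : List String) (k : Nat) (hk : k < vl.length) :
    (((List.range vl.length).map (fun j : Nat => (j : Int))).foldl (fun thisfile line =>
        if line ≠ (k : Int) then thisfile ++ [PySem.List.pyGetD vl line ""] else thisfile) []) =
      vl.take k ++ vl.drop (k+1) := by
  rw [← PySem.List.pyRange_zero_natCast]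
  rw [PySem.List.foldl_append_ite]
  have hsplit : PySem.List.pyRange 0 (vl.length : Int) 1 =
      PySem.List.pyRange 0 (k : Int) 1 ++ ((k : Int) :: PySem.List.pyRange ((k : Int) + 1) (vl.length : Int) 1) := by
    rw [PySem.List.pyRange_one_append 0 (k : Int) (vl.length : Int) (Int.natCast_nonneg k) (by exact_mod_cast hk.le)]
    rw [PySem.List.pyRange_one_cons (a := (k : Int)) (b := (vl.length : Int)) (by exact_mod_cast hk)]
  rw [hsplit, List.filter_append, List.filter_cons]
  have h1 : (PySem.List.pyRange 0 (k : Int) 1).filter (fun x => decide (x ≠ (k : Int))) =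
      PySem.List.pyRange 0 (k : Int) 1 := by
    apply List.filter_eq_self.mpr
    intro x hx
    have := (PySem.List.mem_pyRange_one).mp hx
    simp; omega
  have h2 : (PySem.List.pyRange ((k : Int) + 1) (vl.length : Int) 1).filter (fun x => decide (x ≠ (k : Int))) =
      PySem.List.pyRange ((k : Int) + 1) (vl.length : Int) 1 := by
    apply List.filter_eq_self.mpr
    intro x hx
    have := (PySem.List.mem_pyRange_one).mp hx
    simp; omega
  have h3 : (PySem.List.pyRange ((k : Int) + 1) (vl.length : Int) 1).map (fun j => PySem.List.pyGetD vl j "") =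
      vl.drop ((k : Int) + 1).toNat :=
    PySem.List.map_pyGetD_pyRange' vl "" (by omega)
  have h4 : ((k : Int) + 1).toNat = k + 1 := by omega
  rw [h4] at h3
  rw [h1, h2]
  simp [h3, pv_map_take vl k hk.le]

theorem pv_outer (vl ch va : List String) :
    genvlist_itrRm vl ch va = genvlist_itrRm_alt vl ch va := by
  unfold genvlist_itrRm genvlist_itrRm_alt
  simp only [PySem.List.foldl_append_singleton_eq_map, List.nil_append]
  rw [PySem.List.pyRange_zero_natCast, List.map_map]
  refine congrArg (fun o => (o, "Iterative Removal")) ?_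
  apply List.map_congr_left
  intro k hk
  have hk' : k < vl.length := List.mem_range.mp hk
  simp only [Function.comp_apply]
  exact pv_inner vl k hk'

-- ===== VERDICT (by name: the statement is the Claim_ definition above) =====
theorem genvlist_itrRm_spec : Claim_equal_genvlist_itrRm := by
  intro vl ch va _
  unfold Spec_genvlist_itrRm
  exact pv_outer vl ch va
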